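-- pv_equiv track=rewrite | github.com/eliottcassidy2000/math | 04-computation/gf_diagonal_analysis.py | forward_edge_dist_dp
-- ===== SOURCE A (Python) =====
-- from collections import defaultdict
--
-- def forward_edge_dist_dp(A, n):
--     dp = {}
--     for v in range(n):
--         dp[(1 << v, v, 0)] = 1
--     for mask in range(1, 1 << n):
--         for v in range(n):
--             if not (mask & (1 << v)): continue
--             for fwd in range(n):
--                 c = dp.get((mask, v, fwd), 0)
--                 if c == 0: continue
--                 for u in range(n):
--                     if mask & (1 << u): continue
--                     new_fwd = fwd + A[v][u]
--                     key = (mask | (1 << u), u, new_fwd)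
--                     dp[key] = dp.get(key, 0) + c
--     full = (1 << n) - 1
--     dist = defaultdict(int)
--     for v in range(n):
--         for fwd in range(n):
--             dist[fwd] += dp.get((full, v, fwd), 0)
--     return dict(dist)
-- ===== SOURCE B (Python) =====
-- def forward_edge_dist_dp(A, n):
--     # Exhaustive depth-first enumeration of Hamiltonian paths with pruning:
--     # extend a path only while its running forward total stays in [0, n-1]
--     # (totals outside that band are dead states in the counting, since only
--     # totals 0..n-1 are ever propagated or tallied).
--     hist = [0] * n
--
--     def extend(v, visited, s, k):
--         if k == n:
--             hist[s] += 1
--             return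
--         for u in range(n):
--             if visited & (1 << u):
--                 continue
--             t = s + A[v][u]
--             if 0 <= t < n:
--                 extend(u, visited | (1 << u), t, k + 1)
--
--     for v in range(n):
--         extend(v, 1 << v, 0, 1)
--     return {g: hist[g] for g in range(n)}
-- ===== Notes on version B (the rewrite author's own statement) =====
-- stated objective: alternative
-- what changed: B replaces A's bottom-up subset dynamic programming (a dict of (mask, endpoint, forward-total) states filled over all 2^n masks) with a recursive depth-first backtracking enumeration of Hamiltonian paths that keeps no memo at all: it extends one path at a time, prunes a branch as soon as the running forward total leaves [0, n-1] (totals outside that band are never propagated or tallied by A), and tallies finished paths into a histogram.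
import Mathlib
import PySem

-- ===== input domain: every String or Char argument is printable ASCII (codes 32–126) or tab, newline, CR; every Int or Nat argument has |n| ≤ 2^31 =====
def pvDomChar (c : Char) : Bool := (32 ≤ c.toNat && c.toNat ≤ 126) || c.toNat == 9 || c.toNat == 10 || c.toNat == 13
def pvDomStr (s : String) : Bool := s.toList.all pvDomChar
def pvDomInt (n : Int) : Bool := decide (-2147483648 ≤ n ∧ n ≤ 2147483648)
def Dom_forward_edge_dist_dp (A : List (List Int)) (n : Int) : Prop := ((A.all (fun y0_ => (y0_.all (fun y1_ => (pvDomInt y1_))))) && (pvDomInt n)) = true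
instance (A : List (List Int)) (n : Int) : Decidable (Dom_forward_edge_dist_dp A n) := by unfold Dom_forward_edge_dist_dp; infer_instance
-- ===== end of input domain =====

-- B replaces A's bottom-up subset DP over (mask, endpoint, forward-total) states with a
-- memo-free recursive depth-first enumeration of Hamiltonian paths, pruning a branch as
-- soon as the running forward total leaves [0, n-1] and tallying finished paths.

-- Python's `1 << b` for 0 ≤ b (Pre_ gives 0 ≤ n; every shift amount here is in range(n) or n itself)
def pvShl (a b : Int) : Int := a <<< b.toNat

def pvW (Amat : List (List Int)) (v u : Int) : Int :=
  PySem.List.pyGetD (PySem.List.pyGetD Amat v []) u 0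


-- ===== PORT A =====
def pvAUpd (Amat : List (List Int)) (mask v fwd c : Int)
    (dp : PySem.Dict (Int × Int × Int) Int) (u : Int) : PySem.Dict (Int × Int × Int) Int :=
  if PySem.Int.band mask (pvShl 1 u) ≠ 0 then dp
  else
    let key := (PySem.Int.bor mask (pvShl 1 u), u, fwd + pvW Amat v u)
    dp.insert key (dp.getD key 0 + c)

def pvAFwd (Amat : List (List Int)) (n mask v : Int)
    (dp : PySem.Dict (Int × Int × Int) Int) (fwd : Int) : PySem.Dict (Int × Int × Int) Int :=
  let c := dp.getD (mask, v, fwd) 0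
  if c = 0 then dp
  else (PySem.List.pyRange 0 n 1).foldl (pvAUpd Amat mask v fwd c) dp

def pvAVert (Amat : List (List Int)) (n mask : Int)
    (dp : PySem.Dict (Int × Int × Int) Int) (v : Int) : PySem.Dict (Int × Int × Int) Int :=
  if PySem.Int.band mask (pvShl 1 v) = 0 then dp
  else (PySem.List.pyRange 0 n 1).foldl (pvAFwd Amat n mask v) dp

def pvDistUpd (dp : PySem.Dict (Int × Int × Int) Int) (full v : Int)
    (dist : PySem.Dict Int Int) (fwd : Int) : PySem.Dict Int Int :=
  dist.insert fwd (dist.getD fwd 0 + dp.getD (full, v, fwd) 0)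

def pvADict (A : List (List Int)) (n : Int) : PySem.Dict (Int × Int × Int) Int :=
  (PySem.List.pyRange 1 (pvShl 1 n) 1).foldl
    (fun dp mask => (PySem.List.pyRange 0 n 1).foldl (pvAVert A n mask) dp)
    ((PySem.List.pyRange 0 n 1).foldl
      (fun dp v => dp.insert (pvShl 1 v, v, (0 : Int)) 1) PySem.Dict.empty)

def forward_edge_dist_dp (A : List (List Int)) (n : Int) : List (Int × Int) :=
  ((PySem.List.pyRange 0 n 1).foldl
    (fun dist v => (PySem.List.pyRange 0 n 1).foldl
      (pvDistUpd (pvADict A n) (pvShl 1 n - 1) v) dist)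
    PySem.Dict.empty).items


-- ===== PORT B =====
def pvZero (n : Int) : List Int := List.replicate n.toNat 0

-- the recursive `extend(v, visited, s, k)`: fuel = n - k vertices still to place
def pvExtend (Amat : List (List Int)) (n : Int) :
    Nat → Int → Int → Int → List Int → List Int
  | 0, _v, _visited, s, hist =>
      PySem.List.pySetD hist s (PySem.List.pyGetD hist s 0 + 1)
  | fuel+1, v, visited, s, hist =>
      (PySem.List.pyRange 0 n 1).foldl (fun hist u =>
        if PySem.Int.band visited (pvShl 1 u) ≠ 0 then hist
        else if 0 ≤ s + pvW Amat v u ∧ s + pvW Amat v u < n then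
          pvExtend Amat n fuel u (PySem.Int.bor visited (pvShl 1 u)) (s + pvW Amat v u) hist
        else hist) hist

def forward_edge_dist_dp_alt (A : List (List Int)) (n : Int) : List (Int × Int) :=
  let hist := (PySem.List.pyRange 0 n 1).foldl
    (fun hist v => pvExtend A n (n.toNat - 1) v (pvShl 1 v) 0 hist) (pvZero n)
  (PySem.List.pyRange 0 n 1).map (fun g => (g, PySem.List.pyGetD hist g 0))


-- ===== PRECONDITION & SPEC =====
-- Exactly where the Python A returns: n < 0 makes `1 << n` raise ValueError, and for n ≥ 2 every
-- off-diagonal entry A[v][u] (v, u < n) is read from the singleton states, raising IndexError if absent.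
def Pre_forward_edge_dist_dp (A : List (List Int)) (n : Int) : Prop :=
  0 ≤ n ∧ (2 ≤ n → n ≤ (A.length : Int) ∧
    ∀ v : Nat, v < n.toNat → ∀ u : Nat, u < n.toNat → u ≠ v → u < (A.getD v []).length)
instance (A : List (List Int)) (n : Int) : Decidable (Pre_forward_edge_dist_dp A n) := by
  unfold Pre_forward_edge_dist_dp; infer_instance

def pvWitness_forward_edge_dist_dp : List (List Int) × Int := ([[0, 1], [1, 0]], 2)

def Spec_forward_edge_dist_dp (A : List (List Int)) (n : Int) (out : List (Int × Int)) : Prop := out = forward_edge_dist_dp_alt A n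
instance (A : List (List Int)) (n : Int) (out : List (Int × Int)) : Decidable (Spec_forward_edge_dist_dp A n out) := by unfold Spec_forward_edge_dist_dp; infer_instance

-- ===== CLAIM (what is proved, stated in full; the proofs are below) =====
def Claim_equal_forward_edge_dist_dp : Prop := ∀ (A : List (List Int)) (n : Int), Dom_forward_edge_dist_dp A n → Pre_forward_edge_dist_dp A n → Spec_forward_edge_dist_dp A n (forward_edge_dist_dp A n)

-- ===== LEMMAS AND PROOFS =====

-- ---------- generic list-sum helpers ----------

lemma sum_if_eq_mem {L : List Int} (hL : L.Nodup) (x : Int) (h : Int → Int) :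
    (L.map (fun f => if x = f then h f else 0)).sum = if x ∈ L then h x else 0 := by
  induction L with
  | nil => simp
  | cons a L ih =>
    rcases List.nodup_cons.mp hL with ⟨ha, hL'⟩
    by_cases hx : x = a
    · subst hx; simp [ih hL', ha]
    · simp [hx, ih hL', List.mem_cons]

lemma listSumComm (M E : List Int) (h : Int → Int → Int) :
    (M.map (fun m => (E.map (h m)).sum)).sum
      = (E.map (fun e => (M.map (fun m => h m e)).sum)).sum := by
  induction M with
  | nil => simp
  | cons a M ih =>
    simp only [List.map_cons, List.sum_cons, ih]
    rw [PySem.List.sum_map_add_int]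

lemma length_filter_ne {l : List Int} (hnd : l.Nodup) {e : Int} (he : e ∈ l) :
    (l.filter (fun u => u ≠ e)).length = l.length - 1 := by
  induction l with
  | nil => simp at he
  | cons a l ih =>
    rcases List.nodup_cons.mp hnd with ⟨ha, hl'⟩
    by_cases hea : e = a
    · simp [hea]
      exact fun u hu hh => ha (hh ▸ hu)
    · have h : e ∈ l := by
        rcases List.mem_cons.mp he with h | h
        · exact absurd h hea
        · exact h
      have hae : a ≠ e := fun hh => hea hh.symm
      have hlen : 1 ≤ l.length := List.length_pos_of_mem h
      have hfc : List.filter (fun u => u ≠ e) (a :: l)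
          = a :: List.filter (fun u => u ≠ e) l := by
        simp [hae]
      rw [hfc, List.length_cons, ih hl' h, List.length_cons]
      omega

-- ---------- bit-level facts about pvShl / band / bor on nonnegative masks ----------

lemma shl_eq_pow (k : Int) : pvShl 1 k = ((2 ^ k.toNat : Nat) : Int) := by
  unfold pvShl
  rw [Int.shiftLeft_eq, one_mul]
  push_cast
  ring

lemma shl_nonneg (k : Int) : 0 ≤ pvShl 1 k := by
  rw [shl_eq_pow]; positivity

lemma shl_pos (k : Int) : 0 < pvShl 1 k := by
  rw [shl_eq_pow]
  exact_mod_cast Nat.two_pow_pos k.toNat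

lemma bandsh (m : Int) (hm : 0 ≤ m) (u : Int) :
    PySem.Int.band m (pvShl 1 u) = ((m.toNat &&& 2 ^ u.toNat : Nat) : Int) := by
  rw [shl_eq_pow, PySem.Int.band_of_nonneg hm (by positivity)]
  congr 1

lemma borsh (m : Int) (hm : 0 ≤ m) (u : Int) :
    PySem.Int.bor m (pvShl 1 u) = ((m.toNat ||| 2 ^ u.toNat : Nat) : Int) := by
  rw [shl_eq_pow, PySem.Int.bor_of_nonneg hm (by positivity)]
  congr 1

lemma bor_nonneg (m : Int) (hm : 0 ≤ m) (u : Int) : 0 ≤ PySem.Int.bor m (pvShl 1 u) := by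
  rw [borsh m hm u]; positivity

lemma band_ne_iff (m : Int) (hm : 0 ≤ m) (u : Int) :
    PySem.Int.band m (pvShl 1 u) ≠ 0 ↔ m.toNat.testBit u.toNat := by
  rw [bandsh m hm u, Nat.and_two_pow]
  rcases h : m.toNat.testBit u.toNat <;> simp_all

lemma band_bor_ne_iff (m : Int) (hm : 0 ≤ m) (u e : Int) (hu : 0 ≤ u) (he : 0 ≤ e) :
    PySem.Int.band (PySem.Int.bor m (pvShl 1 e)) (pvShl 1 u) ≠ 0
      ↔ (PySem.Int.band m (pvShl 1 u) ≠ 0 ∨ u = e) := by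
  rw [band_ne_iff _ (bor_nonneg m hm e) u, band_ne_iff m hm u, borsh m hm e,
      Int.toNat_natCast, Nat.testBit_or, Nat.testBit_two_pow]
  rw [Bool.or_eq_true, decide_eq_true_eq]
  constructor
  · rintro (h | h)
    · exact Or.inl h
    · exact Or.inr (by omega)
  · rintro (h | h)
    · exact Or.inl h
    · exact Or.inr (by omega)

lemma bor_gt (m : Int) (hm : 0 ≤ m) (e : Int)
    (h : PySem.Int.band m (pvShl 1 e) = 0) : m < PySem.Int.bor m (pvShl 1 e) := by
  have hbit : ¬ m.toNat.testBit e.toNat := by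
    intro hb
    exact ((band_ne_iff m hm e).mpr hb) h
  rw [borsh m hm e]
  have hle : m.toNat ≤ m.toNat ||| 2 ^ e.toNat := Nat.left_le_or
  have hne : m.toNat ≠ m.toNat ||| 2 ^ e.toNat := by
    intro hh
    have : (m.toNat ||| 2 ^ e.toNat).testBit e.toNat := by
      rw [Nat.testBit_or, Nat.testBit_two_pow]
      simp
    rw [← hh] at this
    exact hbit this
  omega

lemma bor_lt_pow (m : Int) (hm : 0 ≤ m) (n e : Int) (hmn : m < pvShl 1 n)
    (he : 0 ≤ e) (hen : e < n) : PySem.Int.bor m (pvShl 1 e) < pvShl 1 n := by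
  rw [borsh m hm e, shl_eq_pow]
  have h1 : m.toNat < 2 ^ n.toNat := by
    rw [shl_eq_pow] at hmn; omega
  have h2 : (2:Nat) ^ e.toNat < 2 ^ n.toNat :=
    Nat.pow_lt_pow_right (by norm_num) (by omega)
  exact_mod_cast Nat.or_lt_two_pow h1 h2

lemma band_full (n v : Int) (hv : 0 ≤ v) (hvn : v < n) :
    PySem.Int.band (pvShl 1 n - 1) (pvShl 1 v) ≠ 0 := by
  have hnn : (0:Int) ≤ pvShl 1 n - 1 := by have := shl_pos n; omega
  rw [band_ne_iff _ hnn v]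
  have ht : (pvShl 1 n - 1).toNat = 2 ^ n.toNat - 1 := by
    rw [shl_eq_pow]; omega
  rw [ht, Nat.testBit_two_pow_sub_one]
  simp
  omega

lemma band_single (v' v : Int) (hv' : 0 ≤ v') (hv : 0 ≤ v) :
    PySem.Int.band (pvShl 1 v') (pvShl 1 v) ≠ 0 ↔ v = v' := by
  have hnn : (0:Int) ≤ pvShl 1 v' := shl_nonneg v'
  rw [band_ne_iff _ hnn v, shl_eq_pow, Int.toNat_natCast, Nat.testBit_two_pow]
  simp
  omega

-- ---------- characterizations of A's dict folds (deltas of each loop) ----------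

lemma AU_getD (Amat : List (List Int)) (mask v fwd c : Int) (L : List Int) (hL : L.Nodup)
    (dp : PySem.Dict (Int × Int × Int) Int) (m₂ e₂ f₂ : Int) :
    (L.foldl (pvAUpd Amat mask v fwd c) dp).getD (m₂, e₂, f₂) 0
      = dp.getD (m₂, e₂, f₂) 0 +
        (if e₂ ∈ L ∧ PySem.Int.band mask (pvShl 1 e₂) = 0
            ∧ m₂ = PySem.Int.bor mask (pvShl 1 e₂) ∧ f₂ = fwd + pvW Amat v e₂
         then c else 0) := by
  induction L generalizing dp with
  | nil => simp
  | cons u L ih =>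
    rcases List.nodup_cons.mp hL with ⟨hu, hL'⟩
    simp only [List.foldl_cons]
    rw [ih hL']
    by_cases hb : PySem.Int.band mask (pvShl 1 u) = 0
    · have hstep : pvAUpd Amat mask v fwd c dp u
          = dp.insert (PySem.Int.bor mask (pvShl 1 u), u, fwd + pvW Amat v u)
              (dp.getD (PySem.Int.bor mask (pvShl 1 u), u, fwd + pvW Amat v u) 0 + c) := by
        simp [pvAUpd, hb]
      rw [hstep]
      by_cases he : e₂ = u
      · subst he
        rw [PySem.Dict.getD_insert]
        by_cases hk : m₂ = PySem.Int.bor mask (pvShl 1 e₂) ∧ f₂ = fwd + pvW Amat v e₂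
        · obtain ⟨hk1, hk2⟩ := hk; subst hk1; subst hk2
          simp [hu, hb]
        · rw [if_neg (by simp [Prod.ext_iff]; tauto), if_neg (by tauto),
              if_neg (by tauto)]
          try ring
      · rw [PySem.Dict.getD_insert, if_neg (by simp [Prod.ext_iff]; tauto)]
        simp only [List.mem_cons, he, false_or]
    · have hstep : pvAUpd Amat mask v fwd c dp u = dp := by simp [pvAUpd, hb]
      rw [hstep]
      congr 1
      by_cases he : e₂ = u
      · subst he; simp [hu, hb]
      · simp [List.mem_cons, he]

lemma AF_getD (Amat : List (List Int)) (n mask v : Int)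
    (hv : ¬ PySem.Int.band mask (pvShl 1 v) = 0) (F : List Int) :
    ∀ (dp : PySem.Dict (Int × Int × Int) Int) (m₂ e₂ f₂ : Int),
    (F.foldl (pvAFwd Amat n mask v) dp).getD (m₂, e₂, f₂) 0
      = dp.getD (m₂, e₂, f₂) 0 +
        (if PySem.Int.band mask (pvShl 1 e₂) = 0 ∧ m₂ = PySem.Int.bor mask (pvShl 1 e₂)
            ∧ e₂ ∈ PySem.List.pyRange 0 n 1
         then (F.map (fun f => if f₂ = f + pvW Amat v e₂ then dp.getD (mask, v, f) 0 else 0)).sum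
         else 0) := by
  induction F with
  | nil => intro dp m₂ e₂ f₂; simp
  | cons f F ih =>
    intro dp m₂ e₂ f₂
    simp only [List.foldl_cons]
    by_cases hc : dp.getD (mask, v, f) 0 = 0
    · have hstep : pvAFwd Amat n mask v dp f = dp := by simp [pvAFwd, hc]
      rw [hstep, ih]
      congr 1
      split_ifs with h
      · simp [hc]
      · rfl
    · have hstep : pvAFwd Amat n mask v dp f
          = (PySem.List.pyRange 0 n 1).foldl
              (pvAUpd Amat mask v f (dp.getD (mask, v, f) 0)) dp := by
        simp [pvAFwd, hc]
      rw [hstep, ih]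
      have stab : ∀ f' : Int,
          ((PySem.List.pyRange 0 n 1).foldl
            (pvAUpd Amat mask v f (dp.getD (mask, v, f) 0)) dp).getD (mask, v, f') 0
          = dp.getD (mask, v, f') 0 := by
        intro f'
        rw [AU_getD _ _ _ _ _ _ (PySem.List.nodup_pyRange_one 0 n)]
        simp [hv]
      have hmap : (F.map (fun f' => if f₂ = f' + pvW Amat v e₂
              then ((PySem.List.pyRange 0 n 1).foldl
                (pvAUpd Amat mask v f (dp.getD (mask, v, f) 0)) dp).getD (mask, v, f') 0 else 0))
          = (F.map (fun f' => if f₂ = f' + pvW Amat v e₂ then dp.getD (mask, v, f') 0 else 0)) := by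
        apply List.map_congr_left; intro f' _; rw [stab f']
      rw [AU_getD _ _ _ _ _ _ (PySem.List.nodup_pyRange_one 0 n), hmap]
      by_cases hcond : PySem.Int.band mask (pvShl 1 e₂) = 0
          ∧ m₂ = PySem.Int.bor mask (pvShl 1 e₂) ∧ e₂ ∈ PySem.List.pyRange 0 n 1
      · obtain ⟨hc1, hc2, hc3⟩ := hcond
        simp only [hc1, hc2, hc3, and_true, true_and, if_pos]
        by_cases hf : f₂ = f + pvW Amat v e₂
        · simp [hf]; ring
        · simp [hf]
      · rw [if_neg hcond, if_neg hcond, if_neg (by tauto)]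
        ring

lemma initA_getD (L : List Int) (dp : PySem.Dict (Int × Int × Int) Int) (m e f : Int) :
    (L.foldl (fun dp v => dp.insert (pvShl 1 v, v, (0 : Int)) 1) dp).getD (m, e, f) 0
      = if e ∈ L ∧ m = pvShl 1 e ∧ f = 0 then 1 else dp.getD (m, e, f) 0 := by
  induction L generalizing dp with
  | nil => simp
  | cons u L ih =>
    simp only [List.foldl_cons]
    rw [ih]
    by_cases he : e = u
    · subst he
      by_cases hmf : m = pvShl 1 e ∧ f = 0
      · obtain ⟨h1, h2⟩ := hmf; subst h1; subst h2
        by_cases hin : e ∈ L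
        · rw [if_pos ⟨hin, rfl, rfl⟩, if_pos ⟨List.mem_cons_self, rfl, rfl⟩]
        · rw [if_neg (fun h => hin h.1), PySem.Dict.getD_insert, if_pos rfl,
              if_pos ⟨List.mem_cons_self, rfl, rfl⟩]
      · rw [if_neg (fun h => hmf ⟨h.2.1, h.2.2⟩), if_neg (fun h => hmf ⟨h.2.1, h.2.2⟩),
            PySem.Dict.getD_insert, if_neg (by simp [Prod.ext_iff]; tauto)]
    · rw [PySem.Dict.getD_insert,
          if_neg (show ¬((m, e, f) = (pvShl 1 u, u, 0)) by simp [Prod.mk.injEq, he])]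
      simp only [List.mem_cons, he, false_or]

-- ---------- the final dist dict of A, as an explicit association list ----------

lemma dist_getD (dp : PySem.Dict (Int × Int × Int) Int) (full v : Int) (F : List Int)
    (hF : F.Nodup) : ∀ (dist : PySem.Dict Int Int) (k : Int),
    (F.foldl (pvDistUpd dp full v) dist).getD k 0
      = dist.getD k 0 + (if k ∈ F then dp.getD (full, v, k) 0 else 0) := by
  induction F with
  | nil => intro dist k; simp
  | cons f F ih =>
    rcases List.nodup_cons.mp hF with ⟨hu, hF'⟩
    intro dist k
    simp only [List.foldl_cons]
    rw [ih hF']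
    show (dist.insert f (dist.getD f 0 + dp.getD (full, v, f) 0)).getD k 0 + _ = _
    rw [PySem.Dict.getD_insert]
    by_cases hk : k = f
    · subst hk
      rw [if_pos rfl, if_neg hu, if_pos List.mem_cons_self]
      ring
    · rw [if_neg hk]
      simp only [List.mem_cons, hk, false_or]

lemma distAll_getD (dp : PySem.Dict (Int × Int × Int) Int) (full n : Int) (Vs : List Int) :
    ∀ (dist : PySem.Dict Int Int) (k : Int),
    (Vs.foldl (fun dist v => (PySem.List.pyRange 0 n 1).foldl (pvDistUpd dp full v) dist) dist).getD k 0
      = dist.getD k 0 + (if k ∈ PySem.List.pyRange 0 n 1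
          then (Vs.map (fun v => dp.getD (full, v, k) 0)).sum else 0) := by
  induction Vs with
  | nil => intro dist k; simp
  | cons v Vs ih =>
    intro dist k
    simp only [List.foldl_cons]
    rw [ih, dist_getD dp full v _ (PySem.List.nodup_pyRange_one 0 n) dist k]
    by_cases hk : k ∈ PySem.List.pyRange 0 n 1
    · rw [if_pos hk, if_pos hk, if_pos hk]
      simp only [List.map_cons, List.sum_cons]
      ring
    · rw [if_neg hk, if_neg hk, if_neg hk]
      ring

lemma update_self (s : PySem.Set Int) (xs : List Int) (h : ∀ y ∈ xs, y ∈ s) :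
    PySem.Set.update s xs = s := by
  rw [PySem.Set.update_eq_append_filter]
  have hf : List.filter (fun y => !PySem.Set.contains s y) (PySem.Set.ofList xs) = [] := by
    apply List.filter_eq_nil_iff.mpr
    intro y hy
    have hxs : y ∈ xs := by rwa [PySem.Set.mem_ofList] at hy
    simp [h y hxs]
  rw [hf, List.append_nil]

lemma ks_run (R : List Int) : ∀ (Ws : List Int) (ks : PySem.Set Int),
    (∀ y ∈ R, y ∈ ks) → Ws.foldl (fun ks _ => PySem.Set.update ks R) ks = ks := by
  intro Ws
  induction Ws with
  | nil => intro ks _; rfl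
  | cons w Ws ih =>
    intro ks h
    simp only [List.foldl_cons]
    rw [update_self _ _ h]
    exact ih ks h

lemma keys_eval (R : List Int) (hnd : R.Nodup) :
    R.foldl (fun ks _ => PySem.Set.update ks R) ([] : PySem.Set Int) = R := by
  cases hR : R with
  | nil => rfl
  | cons a W =>
    rw [hR] at hnd
    simp only [List.foldl_cons]
    rw [PySem.Set.update_nil_left, PySem.Set.ofList_eq_self_of_nodup _ hnd]
    exact ks_run _ _ _ (fun y hy => hy)

lemma distOne_keys (dp : PySem.Dict (Int × Int × Int) Int) (full v n : Int)
    (dist : PySem.Dict Int Int) :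
    ((PySem.List.pyRange 0 n 1).foldl (pvDistUpd dp full v) dist).keys
      = PySem.Set.update dist.keys (PySem.List.pyRange 0 n 1) := by
  have hfun : (PySem.List.pyRange 0 n 1).foldl (pvDistUpd dp full v) dist
      = (PySem.List.pyRange 0 n 1).foldl
          (fun d x => d.insert x (d.getD x 0 + dp.getD (full, v, x) 0)) dist := rfl
  rw [hfun, PySem.Dict.keys_foldl_insert]

lemma distAll_keys (dp : PySem.Dict (Int × Int × Int) Int) (full n : Int) (Vs : List Int) :
    ∀ (dist : PySem.Dict Int Int),
    (Vs.foldl (fun dist v => (PySem.List.pyRange 0 n 1).foldl (pvDistUpd dp full v) dist) dist).keys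
      = Vs.foldl (fun ks _ => PySem.Set.update ks (PySem.List.pyRange 0 n 1)) dist.keys := by
  induction Vs with
  | nil => intro dist; rfl
  | cons v Vs ih =>
    intro dist
    simp only [List.foldl_cons]
    rw [ih, distOne_keys]

lemma A_items (dp : PySem.Dict (Int × Int × Int) Int) (full n : Int) :
    ((PySem.List.pyRange 0 n 1).foldl
      (fun dist v => (PySem.List.pyRange 0 n 1).foldl (pvDistUpd dp full v) dist)
      PySem.Dict.empty).items
    = (PySem.List.pyRange 0 n 1).map
        (fun f => (f, ((PySem.List.pyRange 0 n 1).map (fun v => dp.getD (full, v, f) 0)).sum)) := by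
  have hkeys : ((PySem.List.pyRange 0 n 1).foldl
      (fun dist v => (PySem.List.pyRange 0 n 1).foldl (pvDistUpd dp full v) dist)
      PySem.Dict.empty).keys = PySem.List.pyRange 0 n 1 := by
    rw [distAll_keys]
    have he : (PySem.Dict.empty : PySem.Dict Int Int).keys = [] := rfl
    rw [he, keys_eval _ (PySem.List.nodup_pyRange_one 0 n)]
  rw [PySem.Dict.items_eq_map_keys _ (by rw [hkeys]; exact PySem.List.nodup_pyRange_one 0 n) 0,
      hkeys]
  apply List.map_congr_left
  intro f hf
  rw [distAll_getD dp full n _ PySem.Dict.empty f, if_pos hf]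
  simp

-- ---------- the completion-count function: what one DFS call of B tallies ----------

def pvF (Amat : List (List Int)) (n : Int) : Nat → Int → Int → Int → Int → Int
  | 0, _m, _v, s, g => if s = g then 1 else 0
  | fuel+1, m, v, s, g =>
      ((PySem.List.pyRange 0 n 1).map (fun u =>
        if PySem.Int.band m (pvShl 1 u) ≠ 0 then 0
        else if 0 ≤ s + pvW Amat v u ∧ s + pvW Amat v u < n then
          pvF Amat n fuel (PySem.Int.bor m (pvShl 1 u)) u (s + pvW Amat v u) g
        else 0)).sum

-- number of vertices in range(n) not yet in the visited mask
def pvFree (n m : Int) : Nat :=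
  ((PySem.List.pyRange 0 n 1).filter (fun u => PySem.Int.band m (pvShl 1 u) = 0)).length

lemma pyGetD_pvZero (n g : Int) (hg : 0 ≤ g) : PySem.List.pyGetD (pvZero n) g 0 = 0 := by
  rw [PySem.List.pyGetD_of_nonneg _ _ hg]
  simp [pvZero]

-- B's recursion adds exactly pvF to every histogram cell
lemma extend_spec (Amat : List (List Int)) (n : Int) :
    ∀ (fuel : Nat) (v visited s : Int) (hist : List Int), 0 ≤ s → s < n →
      hist.length = n.toNat →
      (pvExtend Amat n fuel v visited s hist).length = n.toNat ∧
      ∀ g : Int, 0 ≤ g → g < n →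
        PySem.List.pyGetD (pvExtend Amat n fuel v visited s hist) g 0
          = PySem.List.pyGetD hist g 0 + pvF Amat n fuel visited v s g := by
  intro fuel
  induction fuel with
  | zero =>
    intro v visited s hist hs0 hsn hlen
    have hsl : s.toNat < hist.length := by omega
    have hset : pvExtend Amat n 0 v visited s hist
        = hist.set s.toNat (PySem.List.pyGetD hist s 0 + 1) := by
      simp only [pvExtend]
      rw [PySem.List.pySetD_of_nonneg _ _ hs0]
    constructor
    · rw [hset]; simp [hlen]
    · intro g hg0 hgn
      rw [hset, PySem.List.pyGetD_of_nonneg _ _ hg0, PySem.List.pyGetD_of_nonneg _ _ hg0]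
      have hgl : g.toNat < hist.length := by omega
      by_cases hgs : g = s
      · subst hgs
        rw [List.getD_eq_getElem _ _ (by simpa using hgl)]
        simp only [pvF]
        rw [List.getElem_set_self, List.getD_eq_getElem _ _ hgl,
            PySem.List.pyGetD_of_nonneg _ _ hg0, List.getD_eq_getElem _ _ hgl]
        simp
      · have hne : g.toNat ≠ s.toNat := by omega
        rw [List.getD_eq_getElem _ _ (by simpa using hgl),
            List.getElem_set_ne (by omega), List.getD_eq_getElem _ _ hgl]
        simp only [pvF]
        rw [if_neg (fun hh : s = g => hgs hh.symm)]
        ring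
  | succ fuel ih =>
    intro v visited s hist hs0 hsn hlen
    have hfold : ∀ (L : List Int) (hist : List Int), hist.length = n.toNat →
        (L.foldl (fun hist u =>
          if PySem.Int.band visited (pvShl 1 u) ≠ 0 then hist
          else if 0 ≤ s + pvW Amat v u ∧ s + pvW Amat v u < n then
            pvExtend Amat n fuel u (PySem.Int.bor visited (pvShl 1 u)) (s + pvW Amat v u) hist
          else hist) hist).length = n.toNat ∧
        ∀ g : Int, 0 ≤ g → g < n →
          PySem.List.pyGetD (L.foldl (fun hist u =>
            if PySem.Int.band visited (pvShl 1 u) ≠ 0 then hist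
            else if 0 ≤ s + pvW Amat v u ∧ s + pvW Amat v u < n then
              pvExtend Amat n fuel u (PySem.Int.bor visited (pvShl 1 u)) (s + pvW Amat v u) hist
            else hist) hist) g 0
            = PySem.List.pyGetD hist g 0 +
              (L.map (fun u =>
                if PySem.Int.band visited (pvShl 1 u) ≠ 0 then 0
                else if 0 ≤ s + pvW Amat v u ∧ s + pvW Amat v u < n then
                  pvF Amat n fuel (PySem.Int.bor visited (pvShl 1 u)) u (s + pvW Amat v u) g
                else 0)).sum := by
      intro L
      induction L with
      | nil => intro hist hlen; exact ⟨hlen, by simp⟩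
      | cons u L ihL =>
        intro hist hlen
        simp only [List.foldl_cons, List.map_cons, List.sum_cons]
        by_cases hb : PySem.Int.band visited (pvShl 1 u) ≠ 0
        · simp only [if_pos hb]
          obtain ⟨hl2, hg2⟩ := ihL hist hlen
          exact ⟨hl2, fun g hg0 hgn => by rw [hg2 g hg0 hgn]; ring⟩
        · simp only [if_neg hb]
          by_cases hr : 0 ≤ s + pvW Amat v u ∧ s + pvW Amat v u < n
          · simp only [if_pos hr]
            obtain ⟨hl1, hg1⟩ := ih u (PySem.Int.bor visited (pvShl 1 u))
              (s + pvW Amat v u) hist hr.1 hr.2 hlen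
            obtain ⟨hl2, hg2⟩ := ihL _ hl1
            refine ⟨hl2, fun g hg0 hgn => ?_⟩
            rw [hg2 g hg0 hgn, hg1 g hg0 hgn]
            ring
          · simp only [if_neg hr]
            obtain ⟨hl2, hg2⟩ := ihL hist hlen
            exact ⟨hl2, fun g hg0 hgn => by rw [hg2 g hg0 hgn]; ring⟩
    have hdef : pvExtend Amat n (fuel+1) v visited s hist
        = (PySem.List.pyRange 0 n 1).foldl (fun hist u =>
            if PySem.Int.band visited (pvShl 1 u) ≠ 0 then hist
            else if 0 ≤ s + pvW Amat v u ∧ s + pvW Amat v u < n then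
              pvExtend Amat n fuel u (PySem.Int.bor visited (pvShl 1 u)) (s + pvW Amat v u) hist
            else hist) hist := by
      simp only [pvExtend]
    obtain ⟨hl, hg⟩ := hfold (PySem.List.pyRange 0 n 1) hist hlen
    rw [hdef]
    refine ⟨hl, fun g hg0 hgn => ?_⟩
    rw [hg g hg0 hgn]
    simp only [pvF]

-- ---------- counting free vertices of a mask ----------

lemma free_full (n : Int) : pvFree n (pvShl 1 n - 1) = 0 := by
  unfold pvFree
  rw [List.filter_eq_nil_iff.mpr]
  · rfl
  · intro u hu
    rcases PySem.List.mem_pyRange_one.mp hu with ⟨hu0, hun⟩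
    simp only [decide_eq_true_eq]
    exact fun hh => band_full n u hu0 hun hh

lemma free_pos (n m : Int) (hm : 0 ≤ m) (hlt : m < pvShl 1 n - 1) : 0 < pvFree n m := by
  by_contra h
  have hnil : (PySem.List.pyRange 0 n 1).filter
      (fun u => PySem.Int.band m (pvShl 1 u) = 0) = [] := by
    unfold pvFree at h
    cases hx : (PySem.List.pyRange 0 n 1).filter (fun u => PySem.Int.band m (pvShl 1 u) = 0) with
    | nil => rfl
    | cons a l => rw [hx] at h; simp at h
  have hall : ∀ i : Nat, i < n.toNat → m.toNat.testBit i := by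
    intro i hi
    have hmem : (i : Int) ∈ PySem.List.pyRange 0 n 1 :=
      PySem.List.mem_pyRange_one.mpr ⟨by positivity, by omega⟩
    have := List.filter_eq_nil_iff.mp hnil (i : Int) hmem
    simp only [decide_eq_true_eq] at this
    have hb : PySem.Int.band m (pvShl 1 (i : Int)) ≠ 0 := this
    rw [band_ne_iff m hm] at hb
    simpa using hb
  have hmn : m.toNat < 2 ^ n.toNat := by
    have := shl_eq_pow n
    omega
  have heq : m.toNat = 2 ^ n.toNat - 1 := by
    apply Nat.eq_of_testBit_eq
    intro i
    by_cases hi : i < n.toNat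
    · rw [hall i hi, Nat.testBit_two_pow_sub_one]
      simp [hi]
    · have h1 : m.toNat.testBit i = false := by
        apply Nat.testBit_eq_false_of_lt
        calc m.toNat < 2 ^ n.toNat := hmn
        _ ≤ 2 ^ i := Nat.pow_le_pow_right (by norm_num) (by omega)
      rw [h1, Nat.testBit_two_pow_sub_one]
      simp [hi]
  have := shl_eq_pow n
  omega

lemma free_bor (n m e : Int) (hm : 0 ≤ m) (he : 0 ≤ e) (hen : e < n)
    (hb : PySem.Int.band m (pvShl 1 e) = 0) :
    pvFree n (PySem.Int.bor m (pvShl 1 e)) + 1 = pvFree n m := by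
  unfold pvFree
  have hcong : (PySem.List.pyRange 0 n 1).filter
      (fun u => PySem.Int.band (PySem.Int.bor m (pvShl 1 e)) (pvShl 1 u) = 0)
      = ((PySem.List.pyRange 0 n 1).filter
          (fun u => PySem.Int.band m (pvShl 1 u) = 0)).filter (fun u => u ≠ e) := by
    rw [List.filter_filter]
    apply List.filter_congr
    intro u hu
    rcases PySem.List.mem_pyRange_one.mp hu with ⟨hu0, _⟩
    rw [← Bool.decide_and, decide_eq_decide]
    have hiff := band_bor_ne_iff m hm u e hu0 he
    have h2 : ¬ (PySem.Int.band m (pvShl 1 u) ≠ 0 ∨ u = e)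
        ↔ (¬ u = e ∧ PySem.Int.band m (pvShl 1 u) = 0) := by tauto
    rw [← h2, ← hiff]
    tauto
  rw [hcong]
  have hmem : e ∈ (PySem.List.pyRange 0 n 1).filter
      (fun u => PySem.Int.band m (pvShl 1 u) = 0) := by
    rw [List.mem_filter]
    exact ⟨PySem.List.mem_pyRange_one.mpr ⟨he, hen⟩, by simp [hb]⟩
  have hnd : ((PySem.List.pyRange 0 n 1).filter
      (fun u => PySem.Int.band m (pvShl 1 u) = 0)).Nodup :=
    (PySem.List.nodup_pyRange_one 0 n).filter _
  rw [length_filter_ne hnd hmem]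
  have := List.length_pos_of_mem hmem
  omega

lemma free_single (n v : Int) (hv : 0 ≤ v) (hvn : v < n) :
    pvFree n (pvShl 1 v) = n.toNat - 1 := by
  unfold pvFree
  have hcong : (PySem.List.pyRange 0 n 1).filter
      (fun u => PySem.Int.band (pvShl 1 v) (pvShl 1 u) = 0)
      = (PySem.List.pyRange 0 n 1).filter (fun u => u ≠ v) := by
    apply List.filter_congr
    intro u hu
    rcases PySem.List.mem_pyRange_one.mp hu with ⟨hu0, _⟩
    rw [decide_eq_decide]
    have := band_single v u hv hu0
    tauto
  rw [hcong, length_filter_ne (PySem.List.nodup_pyRange_one 0 n)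
        (PySem.List.mem_pyRange_one.mpr ⟨hv, hvn⟩),
      PySem.List.length_pyRange_one]
  omega

-- ---------- the potential Φ: dp states weighted by their completion counts ----------

def pvTerm (Amat : List (List Int)) (n : Int) (dp : PySem.Dict (Int × Int × Int) Int)
    (g m : Int) : Int :=
  ((PySem.List.pyRange 0 n 1).map (fun v =>
    if PySem.Int.band m (pvShl 1 v) ≠ 0 then
      ((PySem.List.pyRange 0 n 1).map (fun f =>
        dp.getD (m, v, f) 0 * pvF Amat n (pvFree n m) m v f g)).sum
    else 0)).sum

def pvPhi (Amat : List (List Int)) (n : Int) (dp : PySem.Dict (Int × Int × Int) Int)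
    (g : Int) (M : List Int) : Int :=
  (M.map (pvTerm Amat n dp g)).sum

def pvAns (n : Int) (dp : PySem.Dict (Int × Int × Int) Int) (g : Int) : Int :=
  ((PySem.List.pyRange 0 n 1).map (fun v => dp.getD (pvShl 1 n - 1, v, g) 0)).sum

-- ---------- delta of processing one mask K (the v- and fwd-loops together) ----------

lemma step_getD (Amat : List (List Int)) (n K : Int) (hK : 0 ≤ K) (L : List Int) :
    ∀ (dp : PySem.Dict (Int × Int × Int) Int) (m e f : Int),
    (L.foldl (pvAVert Amat n K) dp).getD (m, e, f) 0
      = dp.getD (m, e, f) 0 +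
        (if PySem.Int.band K (pvShl 1 e) = 0 ∧ m = PySem.Int.bor K (pvShl 1 e)
            ∧ e ∈ PySem.List.pyRange 0 n 1
         then (L.map (fun v =>
            if PySem.Int.band K (pvShl 1 v) ≠ 0 then
              ((PySem.List.pyRange 0 n 1).map (fun f' =>
                if f = f' + pvW Amat v e then dp.getD (K, v, f') 0 else 0)).sum
            else 0)).sum
         else 0) := by
  induction L with
  | nil => intro dp m e f; simp
  | cons v L ih =>
    intro dp m e f
    simp only [List.foldl_cons, List.map_cons, List.sum_cons]
    by_cases hv : PySem.Int.band K (pvShl 1 v) = 0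
    · have hstep : pvAVert Amat n K dp v = dp := by simp [pvAVert, hv]
      rw [hstep, ih dp m e f]
      simp only [hv, ne_eq, not_true_eq_false, ite_false]
      congr 1
      split_ifs with h
      · simp [hv]
      · rfl
    · have hstep : pvAVert Amat n K dp v
          = (PySem.List.pyRange 0 n 1).foldl (pvAFwd Amat n K v) dp := by
        simp [pvAVert, hv]
      rw [hstep, ih _ m e f, AF_getD Amat n K v hv _ dp m e f]
      have stab : ∀ v' f' : Int,
          ((PySem.List.pyRange 0 n 1).foldl (pvAFwd Amat n K v) dp).getD (K, v', f') 0
            = dp.getD (K, v', f') 0 := by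
        intro v' f'
        rw [AF_getD Amat n K v hv _ dp K v' f']
        have : ¬ (PySem.Int.band K (pvShl 1 v') = 0
            ∧ K = PySem.Int.bor K (pvShl 1 v') ∧ v' ∈ PySem.List.pyRange 0 n 1) := by
          rintro ⟨h1, h2, _⟩
          exact absurd h2 (ne_of_lt (bor_gt K hK v' h1))
        rw [if_neg this]
        ring
      have hmap : (L.map (fun v'' =>
            if PySem.Int.band K (pvShl 1 v'') ≠ 0 then
              ((PySem.List.pyRange 0 n 1).map (fun f' =>
                if f = f' + pvW Amat v'' e then
                  ((PySem.List.pyRange 0 n 1).foldl (pvAFwd Amat n K v) dp).getD (K, v'', f') 0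
                else 0)).sum
            else 0))
          = (L.map (fun v'' =>
            if PySem.Int.band K (pvShl 1 v'') ≠ 0 then
              ((PySem.List.pyRange 0 n 1).map (fun f' =>
                if f = f' + pvW Amat v'' e then dp.getD (K, v'', f') 0 else 0)).sum
            else 0)) := by
        apply List.map_congr_left
        intro v'' _
        split_ifs with h
        · congr 1
          apply List.map_congr_left
          intro f' _
          rw [stab v'' f']
        · rfl
      rw [hmap]
      by_cases hcond : PySem.Int.band K (pvShl 1 e) = 0
          ∧ m = PySem.Int.bor K (pvShl 1 e) ∧ e ∈ PySem.List.pyRange 0 n 1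
      · rw [if_pos hcond, if_pos hcond, if_pos hcond, if_pos hv]
        ring
      · rw [if_neg hcond, if_neg hcond, if_neg hcond]
        ring

-- ---------- one step of A redistributes a mask's Φ-weight onto its successors ----------

lemma ite_sum (c : Prop) [Decidable c] (L : List Int) (h : Int → Int) :
    (L.map (fun x => if c then h x else 0)).sum = if c then (L.map h).sum else 0 := by
  split_ifs with hc <;> simp

def pvCan (Amat : List (List Int)) (n : Int) (dp : PySem.Dict (Int × Int × Int) Int)
    (g K : Int) : Int :=
  ((PySem.List.pyRange 0 n 1).map (fun v' =>
    if PySem.Int.band K (pvShl 1 v') ≠ 0 then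
      ((PySem.List.pyRange 0 n 1).map (fun f' =>
        ((PySem.List.pyRange 0 n 1).map (fun u =>
          if PySem.Int.band K (pvShl 1 u) = 0 then
            (if 0 ≤ f' + pvW Amat v' u ∧ f' + pvW Amat v' u < n then
              dp.getD (K, v', f') 0 *
                pvF Amat n (pvFree n (PySem.Int.bor K (pvShl 1 u)))
                  (PySem.Int.bor K (pvShl 1 u)) u (f' + pvW Amat v' u) g
            else 0)
          else 0)).sum)).sum
    else 0)).sum

lemma can_term (Amat : List (List Int)) (n : Int) (dp : PySem.Dict (Int × Int × Int) Int)
    (g K : Int) (hK0 : 0 ≤ K) (hKlt : K < pvShl 1 n - 1) :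
    pvTerm Amat n dp g K = pvCan Amat n dp g K := by
  unfold pvTerm pvCan
  congr 1
  apply List.map_congr_left
  intro v' _
  by_cases hgv : PySem.Int.band K (pvShl 1 v') ≠ 0
  · rw [if_pos hgv, if_pos hgv]
    congr 1
    apply List.map_congr_left
    intro f' _
    have hfu : pvFree n K = (pvFree n K - 1) + 1 := by
      have := free_pos n K hK0 hKlt
      omega
    rw [hfu]
    simp only [pvF]
    rw [← List.sum_map_mul_left]
    congr 1
    apply List.map_congr_left
    intro u humem
    rcases PySem.List.mem_pyRange_one.mp humem with ⟨hu0, hun⟩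
    by_cases hu : PySem.Int.band K (pvShl 1 u) = 0
    · rw [if_pos hu, if_neg (by simpa using hu)]
      have hfb : pvFree n (PySem.Int.bor K (pvShl 1 u)) = pvFree n K - 1 := by
        have := free_bor n K u hK0 hu0 hun hu
        omega
      rw [hfb, mul_ite, mul_zero]
    · rw [if_neg hu, if_pos (by simpa using hu)]
      ring
  · rw [if_neg hgv, if_neg hgv]

lemma phi_split (Amat : List (List Int)) (n K g : Int) (hK0 : 0 ≤ K)
    (dp : PySem.Dict (Int × Int × Int) Int) (M : List Int) :
    pvPhi Amat n ((PySem.List.pyRange 0 n 1).foldl (pvAVert Amat n K) dp) g M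
      = pvPhi Amat n dp g M +
        (M.map (fun m =>
          ((PySem.List.pyRange 0 n 1).map (fun v =>
            if PySem.Int.band K (pvShl 1 v) = 0 ∧ m = PySem.Int.bor K (pvShl 1 v)
                ∧ v ∈ PySem.List.pyRange 0 n 1 then
              ((PySem.List.pyRange 0 n 1).map (fun f =>
                ((PySem.List.pyRange 0 n 1).map (fun v'' =>
                  if PySem.Int.band K (pvShl 1 v'') ≠ 0 then
                    ((PySem.List.pyRange 0 n 1).map (fun f' =>
                      if f = f' + pvW Amat v'' v then dp.getD (K, v'', f') 0 else 0)).sum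
                  else 0)).sum * pvF Amat n (pvFree n m) m v f g)).sum
            else 0)).sum)).sum := by
  unfold pvPhi
  rw [← PySem.List.sum_map_add_int]
  congr 1
  apply List.map_congr_left
  intro m _
  unfold pvTerm
  rw [← PySem.List.sum_map_add_int]
  congr 1
  apply List.map_congr_left
  intro v _
  by_cases hc : PySem.Int.band K (pvShl 1 v) = 0 ∧ m = PySem.Int.bor K (pvShl 1 v)
      ∧ v ∈ PySem.List.pyRange 0 n 1
  · rcases PySem.List.mem_pyRange_one.mp hc.2.2 with ⟨hv0, _⟩
    have hbm : PySem.Int.band m (pvShl 1 v) ≠ 0 := by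
      rw [hc.2.1]
      exact (band_bor_ne_iff K hK0 v v hv0 hv0).mpr (Or.inr rfl)
    rw [if_pos hbm, if_pos hbm, if_pos hc, ← PySem.List.sum_map_add_int]
    congr 1
    apply List.map_congr_left
    intro f _
    rw [step_getD Amat n K hK0 _ dp m v f, if_pos hc]
    ring
  · rw [if_neg hc]
    by_cases hbm : PySem.Int.band m (pvShl 1 v) ≠ 0
    · rw [if_pos hbm, if_pos hbm]
      have : ∀ f ∈ PySem.List.pyRange 0 n 1,
          ((PySem.List.pyRange 0 n 1).foldl (pvAVert Amat n K) dp).getD (m, v, f) 0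
            = dp.getD (m, v, f) 0 := by
        intro f _
        rw [step_getD Amat n K hK0 _ dp m v f, if_neg hc]
        ring
      rw [List.map_congr_left (fun f hf => by rw [this f hf])]
      ring
    · rw [if_neg hbm, if_neg hbm]
      ring

def pvTriple (Amat : List (List Int)) (n : Int) (dp : PySem.Dict (Int × Int × Int) Int)
    (g K : Int) : Int :=
  ((PySem.List.pyRange 0 n 1).map (fun v =>
    ((PySem.List.pyRange 0 n 1).map (fun v' =>
      ((PySem.List.pyRange 0 n 1).map (fun f' =>
        if PySem.Int.band K (pvShl 1 v) = 0 then
          if PySem.Int.band K (pvShl 1 v') ≠ 0 then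
            if 0 ≤ f' + pvW Amat v' v ∧ f' + pvW Amat v' v < n then
              dp.getD (K, v', f') 0 *
                pvF Amat n (pvFree n (PySem.Int.bor K (pvShl 1 v)))
                  (PySem.Int.bor K (pvShl 1 v)) v (f' + pvW Amat v' v) g
            else 0
          else 0
        else 0)).sum)).sum)).sum

lemma can_triple (Amat : List (List Int)) (n : Int) (dp : PySem.Dict (Int × Int × Int) Int)
    (g K : Int) : pvCan Amat n dp g K = pvTriple Amat n dp g K := by
  unfold pvCan pvTriple
  -- push the v'-guard inside the two inner sums
  have hpush : ∀ v' : Int,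
      (if PySem.Int.band K (pvShl 1 v') ≠ 0 then
        ((PySem.List.pyRange 0 n 1).map (fun f' =>
          ((PySem.List.pyRange 0 n 1).map (fun u =>
            if PySem.Int.band K (pvShl 1 u) = 0 then
              (if 0 ≤ f' + pvW Amat v' u ∧ f' + pvW Amat v' u < n then
                dp.getD (K, v', f') 0 *
                  pvF Amat n (pvFree n (PySem.Int.bor K (pvShl 1 u)))
                    (PySem.Int.bor K (pvShl 1 u)) u (f' + pvW Amat v' u) g
              else 0)
            else 0)).sum)).sum
      else 0)
      = ((PySem.List.pyRange 0 n 1).map (fun f' =>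
          ((PySem.List.pyRange 0 n 1).map (fun u =>
            if PySem.Int.band K (pvShl 1 u) = 0 then
              if PySem.Int.band K (pvShl 1 v') ≠ 0 then
                if 0 ≤ f' + pvW Amat v' u ∧ f' + pvW Amat v' u < n then
                  dp.getD (K, v', f') 0 *
                    pvF Amat n (pvFree n (PySem.Int.bor K (pvShl 1 u)))
                      (PySem.Int.bor K (pvShl 1 u)) u (f' + pvW Amat v' u) g
                else 0
              else 0
            else 0)).sum)).sum := by
    intro v'
    rw [← ite_sum]
    congr 1
    apply List.map_congr_left
    intro f' _
    rw [← ite_sum]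
    congr 1
    apply List.map_congr_left
    intro u _
    split_ifs <;> rfl
  rw [List.map_congr_left (fun v' _ => hpush v')]
  -- swap (f', u) inside each v', then swap (v', u)
  rw [List.map_congr_left (fun v' _ => listSumComm (PySem.List.pyRange 0 n 1)
        (PySem.List.pyRange 0 n 1) _)]
  rw [listSumComm]

lemma x_eq (Amat : List (List Int)) (n K g v : Int)
    (dp : PySem.Dict (Int × Int × Int) Int) :
    ((PySem.List.pyRange 0 n 1).map (fun f =>
      ((PySem.List.pyRange 0 n 1).map (fun v'' =>
        if PySem.Int.band K (pvShl 1 v'') ≠ 0 then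
          ((PySem.List.pyRange 0 n 1).map (fun f' =>
            if f = f' + pvW Amat v'' v then dp.getD (K, v'', f') 0 else 0)).sum
        else 0)).sum *
        pvF Amat n (pvFree n (PySem.Int.bor K (pvShl 1 v)))
          (PySem.Int.bor K (pvShl 1 v)) v f g)).sum
    = ((PySem.List.pyRange 0 n 1).map (fun v'' =>
        ((PySem.List.pyRange 0 n 1).map (fun f' =>
          if PySem.Int.band K (pvShl 1 v'') ≠ 0 then
            if 0 ≤ f' + pvW Amat v'' v ∧ f' + pvW Amat v'' v < n then
              dp.getD (K, v'', f') 0 *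
                pvF Amat n (pvFree n (PySem.Int.bor K (pvShl 1 v)))
                  (PySem.Int.bor K (pvShl 1 v)) v (f' + pvW Amat v'' v) g
            else 0
          else 0)).sum)).sum := by
  have hXf : ∀ f : Int,
      ((PySem.List.pyRange 0 n 1).map (fun v'' =>
        if PySem.Int.band K (pvShl 1 v'') ≠ 0 then
          ((PySem.List.pyRange 0 n 1).map (fun f' =>
            if f = f' + pvW Amat v'' v then dp.getD (K, v'', f') 0 else 0)).sum
        else 0)).sum *
        pvF Amat n (pvFree n (PySem.Int.bor K (pvShl 1 v)))
          (PySem.Int.bor K (pvShl 1 v)) v f g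
      = ((PySem.List.pyRange 0 n 1).map (fun v'' =>
          if PySem.Int.band K (pvShl 1 v'') ≠ 0 then
            ((PySem.List.pyRange 0 n 1).map (fun f' =>
              if f = f' + pvW Amat v'' v then
                dp.getD (K, v'', f') 0 *
                  pvF Amat n (pvFree n (PySem.Int.bor K (pvShl 1 v)))
                    (PySem.Int.bor K (pvShl 1 v)) v f g
              else 0)).sum
          else 0)).sum := by
    intro f
    rw [← List.sum_map_mul_right]
    congr 1
    apply List.map_congr_left
    intro v'' _
    rw [ite_mul, zero_mul, ← List.sum_map_mul_right]
    congr 1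
    · congr 1
      apply List.map_congr_left
      intro f' _
      rw [ite_mul, zero_mul]
  rw [List.map_congr_left (fun f _ => hXf f), listSumComm]
  congr 1
  apply List.map_congr_left
  intro v'' _
  rw [ite_sum]
  by_cases hbv'' : PySem.Int.band K (pvShl 1 v'') ≠ 0
  · rw [if_pos hbv'', listSumComm]
    congr 1
    apply List.map_congr_left
    intro f' _
    rw [if_pos hbv'']
    have hflip : ∀ f : Int,
        (if f = f' + pvW Amat v'' v then
          dp.getD (K, v'', f') 0 *
            pvF Amat n (pvFree n (PySem.Int.bor K (pvShl 1 v)))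
              (PySem.Int.bor K (pvShl 1 v)) v f g
        else 0)
        = (if f' + pvW Amat v'' v = f then
            dp.getD (K, v'', f') 0 *
              pvF Amat n (pvFree n (PySem.Int.bor K (pvShl 1 v)))
                (PySem.Int.bor K (pvShl 1 v)) v f g
          else 0) := by
      intro f
      exact if_congr eq_comm rfl rfl
    rw [List.map_congr_left (fun f _ => hflip f),
        sum_if_eq_mem (PySem.List.nodup_pyRange_one 0 n)]
    exact if_congr PySem.List.mem_pyRange_one rfl rfl
  · rw [if_neg hbv'']
    symm
    apply List.sum_eq_zero
    intro x hx
    rcases List.mem_map.mp hx with ⟨f', _, rfl⟩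
    rw [if_neg hbv'']

lemma deltaD_triple (Amat : List (List Int)) (n K g : Int)
    (dp : PySem.Dict (Int × Int × Int) Int) (hK0 : 0 ≤ K) (hK2 : K < pvShl 1 n) :
    ((PySem.List.pyRange (K+1) (pvShl 1 n) 1).map (fun m =>
      ((PySem.List.pyRange 0 n 1).map (fun v =>
        if PySem.Int.band K (pvShl 1 v) = 0 ∧ m = PySem.Int.bor K (pvShl 1 v)
            ∧ v ∈ PySem.List.pyRange 0 n 1 then
          ((PySem.List.pyRange 0 n 1).map (fun f =>
            ((PySem.List.pyRange 0 n 1).map (fun v'' =>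
              if PySem.Int.band K (pvShl 1 v'') ≠ 0 then
                ((PySem.List.pyRange 0 n 1).map (fun f' =>
                  if f = f' + pvW Amat v'' v then dp.getD (K, v'', f') 0 else 0)).sum
              else 0)).sum * pvF Amat n (pvFree n m) m v f g)).sum
        else 0)).sum)).sum
    = pvTriple Amat n dp g K := by
  rw [listSumComm]
  unfold pvTriple
  congr 1
  apply List.map_congr_left
  intro v hvmem
  rcases PySem.List.mem_pyRange_one.mp hvmem with ⟨hv0, hvn⟩
  by_cases hbv : PySem.Int.band K (pvShl 1 v) = 0
  · have hterm : ∀ m : Int,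
        (if PySem.Int.band K (pvShl 1 v) = 0 ∧ m = PySem.Int.bor K (pvShl 1 v)
            ∧ v ∈ PySem.List.pyRange 0 n 1 then
          ((PySem.List.pyRange 0 n 1).map (fun f =>
            ((PySem.List.pyRange 0 n 1).map (fun v'' =>
              if PySem.Int.band K (pvShl 1 v'') ≠ 0 then
                ((PySem.List.pyRange 0 n 1).map (fun f' =>
                  if f = f' + pvW Amat v'' v then dp.getD (K, v'', f') 0 else 0)).sum
              else 0)).sum * pvF Amat n (pvFree n m) m v f g)).sum
        else 0)
        = (if PySem.Int.bor K (pvShl 1 v) = m then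
            ((PySem.List.pyRange 0 n 1).map (fun f =>
              ((PySem.List.pyRange 0 n 1).map (fun v'' =>
                if PySem.Int.band K (pvShl 1 v'') ≠ 0 then
                  ((PySem.List.pyRange 0 n 1).map (fun f' =>
                    if f = f' + pvW Amat v'' v then dp.getD (K, v'', f') 0 else 0)).sum
                else 0)).sum * pvF Amat n (pvFree n m) m v f g)).sum
          else 0) := by
      intro m
      exact if_congr ⟨fun h => h.2.1.symm, fun h => ⟨hbv, h.symm, hvmem⟩⟩ rfl rfl
    rw [List.map_congr_left (fun m _ => hterm m),
        sum_if_eq_mem (PySem.List.nodup_pyRange_one (K+1) (pvShl 1 n)),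
        if_pos (PySem.List.mem_pyRange_one.mpr
          ⟨by have := bor_gt K hK0 v hbv; omega,
           bor_lt_pow K hK0 n v hK2 hv0 hvn⟩),
        x_eq Amat n K g v dp]
    congr 1
    apply List.map_congr_left
    intro v'' _
    apply congrArg
    apply List.map_congr_left
    intro f' _
    rw [if_pos hbv]
  · rw [List.map_congr_left (fun m (_ : m ∈ PySem.List.pyRange (K+1) (pvShl 1 n) 1) =>
        if_neg (fun hc => hbv hc.1))]
    rw [List.sum_eq_zero (fun x hx => by rcases List.mem_map.mp hx with ⟨m, _, rfl⟩; rfl)]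
    symm
    apply List.sum_eq_zero
    intro x hx
    rcases List.mem_map.mp hx with ⟨v'', _, rfl⟩
    apply List.sum_eq_zero
    intro y hy
    rcases List.mem_map.mp hy with ⟨f', _, rfl⟩
    rw [if_neg hbv]

lemma phi_step (Amat : List (List Int)) (n K g : Int)
    (dp : PySem.Dict (Int × Int × Int) Int) (hK0 : 0 ≤ K) (hKlt : K < pvShl 1 n - 1) :
    pvPhi Amat n ((PySem.List.pyRange 0 n 1).foldl (pvAVert Amat n K) dp) g
        (PySem.List.pyRange (K+1) (pvShl 1 n) 1)
      = pvPhi Amat n dp g (PySem.List.pyRange (K+1) (pvShl 1 n) 1) + pvTerm Amat n dp g K := by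
  rw [phi_split Amat n K g hK0 dp _,
      deltaD_triple Amat n K g dp hK0 (by omega),
      ← can_triple, ← can_term Amat n dp g K hK0 hKlt]

-- at the full mask the Φ-term is exactly the answer read-out, and the step is a no-op
lemma term_full (Amat : List (List Int)) (n g : Int)
    (dp : PySem.Dict (Int × Int × Int) Int) (hg0 : 0 ≤ g) (hgn : g < n) :
    pvTerm Amat n dp g (pvShl 1 n - 1) = pvAns n dp g := by
  unfold pvTerm pvAns
  congr 1
  apply List.map_congr_left
  intro v hvmem
  rcases PySem.List.mem_pyRange_one.mp hvmem with ⟨hv0, hvn⟩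
  rw [if_pos (band_full n v hv0 hvn), free_full n]
  have hpt : ∀ f : Int,
      dp.getD (pvShl 1 n - 1, v, f) 0 * pvF Amat n 0 (pvShl 1 n - 1) v f g
        = (if g = f then dp.getD (pvShl 1 n - 1, v, f) 0 else 0) := by
    intro f
    simp only [pvF]
    by_cases hf : f = g
    · subst hf; simp
    · rw [if_neg hf, if_neg (fun hh => hf hh.symm), mul_zero]
  rw [List.map_congr_left (fun f _ => hpt f),
      sum_if_eq_mem (PySem.List.nodup_pyRange_one 0 n),
      if_pos (PySem.List.mem_pyRange_one.mpr ⟨hg0, hgn⟩)]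

lemma ans_step_full (Amat : List (List Int)) (n g : Int)
    (dp : PySem.Dict (Int × Int × Int) Int) :
    pvAns n ((PySem.List.pyRange 0 n 1).foldl (pvAVert Amat n (pvShl 1 n - 1)) dp) g
      = pvAns n dp g := by
  unfold pvAns
  congr 1
  apply List.map_congr_left
  intro v hvmem
  rcases PySem.List.mem_pyRange_one.mp hvmem with ⟨hv0, hvn⟩
  have hnn : (0:Int) ≤ pvShl 1 n - 1 := by have := shl_pos n; omega
  rw [step_getD Amat n (pvShl 1 n - 1) hnn _ dp _ v g,
      if_neg (fun hc => band_full n v hv0 hvn hc.1)]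
  ring

-- the invariant: the final answer equals the Φ-potential of the unprocessed masks
lemma inv_phi (Amat : List (List Int)) (n g : Int) (hg0 : 0 ≤ g) (hgn : g < n) :
    ∀ (d : Nat) (K : Int) (dp : PySem.Dict (Int × Int × Int) Int), 1 ≤ K →
      K + (d : Int) = pvShl 1 n →
      pvAns n ((PySem.List.pyRange K (pvShl 1 n) 1).foldl
          (fun dp mask => (PySem.List.pyRange 0 n 1).foldl (pvAVert Amat n mask) dp) dp) g
        = pvPhi Amat n dp g (PySem.List.pyRange K (pvShl 1 n) 1)
          + (if d = 0 then pvAns n dp g else 0) := by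
  intro d
  induction d with
  | zero =>
    intro K dp hK1 hKd
    rw [show PySem.List.pyRange K (pvShl 1 n) 1 = [] from
          PySem.List.pyRange_one_eq_nil (by push_cast at hKd; omega)]
    simp [pvPhi]
  | succ d ih =>
    intro K dp hK1 hKd
    have hKd' : K + 1 + (d : Int) = pvShl 1 n := by push_cast at hKd ⊢; omega
    have hKlt : K < pvShl 1 n := by omega
    rw [PySem.List.pyRange_one_cons hKlt]
    simp only [List.foldl_cons]
    rw [ih (K+1) _ (by omega) hKd']
    by_cases hd : d = 0
    · subst hd
      have hKfull : K = pvShl 1 n - 1 := by push_cast at hKd; omega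
      subst hKfull
      rw [show PySem.List.pyRange (pvShl 1 n - 1 + 1) (pvShl 1 n) 1 = [] from
            PySem.List.pyRange_one_eq_nil (by omega)]
      rw [ans_step_full Amat n g dp]
      unfold pvPhi
      simp only [List.map_nil, List.sum_nil, List.map_cons, List.sum_cons]
      rw [term_full Amat n g dp hg0 hgn]
      simp
    · rw [phi_step Amat n K g dp (by omega) (by push_cast at hKd; omega)]
      unfold pvPhi
      simp only [List.map_cons, List.sum_cons]
      rw [if_neg hd, if_neg (by simp)]
      ring

-- Φ of the singleton initialization = B's top-level sum of completion counts
lemma phi_init (Amat : List (List Int)) (n g : Int) (hg0 : 0 ≤ g) (hgn : g < n) :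
    pvPhi Amat n
      ((PySem.List.pyRange 0 n 1).foldl
        (fun dp v => dp.insert (pvShl 1 v, v, (0 : Int)) 1) PySem.Dict.empty) g
      (PySem.List.pyRange 1 (pvShl 1 n) 1)
    = ((PySem.List.pyRange 0 n 1).map (fun v =>
        pvF Amat n (n.toNat - 1) (pvShl 1 v) v 0 g)).sum := by
  unfold pvPhi pvTerm
  rw [listSumComm]
  congr 1
  apply List.map_congr_left
  intro v hvmem
  rcases PySem.List.mem_pyRange_one.mp hvmem with ⟨hv0, hvn⟩
  have hgetD : ∀ m f : Int,
      ((PySem.List.pyRange 0 n 1).foldl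
        (fun dp v => dp.insert (pvShl 1 v, v, (0 : Int)) 1) PySem.Dict.empty).getD (m, v, f) 0
      = (if m = pvShl 1 v ∧ f = 0 then (1:Int) else 0) := by
    intro m f
    rw [initA_getD (PySem.List.pyRange 0 n 1) PySem.Dict.empty m v f]
    by_cases hc : m = pvShl 1 v ∧ f = 0
    · rw [if_pos ⟨hvmem, hc.1, hc.2⟩, if_pos hc]
    · rw [if_neg (fun hh => hc ⟨hh.2.1, hh.2.2⟩), if_neg hc]
      simp
  have hterm : ∀ m : Int,
      (if PySem.Int.band m (pvShl 1 v) ≠ 0 then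
        ((PySem.List.pyRange 0 n 1).map (fun f =>
          ((PySem.List.pyRange 0 n 1).foldl
            (fun dp v => dp.insert (pvShl 1 v, v, (0 : Int)) 1) PySem.Dict.empty).getD (m, v, f) 0
            * pvF Amat n (pvFree n m) m v f g)).sum
      else 0)
      = (if pvShl 1 v = m then pvF Amat n (pvFree n m) m v 0 g else 0) := by
    intro m
    by_cases hm : m = pvShl 1 v
    · subst hm
      rw [if_pos ((band_single v v hv0 hv0).mpr rfl), if_pos rfl]
      have hpt : ∀ f : Int,
          ((PySem.List.pyRange 0 n 1).foldl
            (fun dp v => dp.insert (pvShl 1 v, v, (0 : Int)) 1) PySem.Dict.empty).getD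
              (pvShl 1 v, v, f) 0
            * pvF Amat n (pvFree n (pvShl 1 v)) (pvShl 1 v) v f g
          = (if (0:Int) = f then pvF Amat n (pvFree n (pvShl 1 v)) (pvShl 1 v) v f g else 0) := by
        intro f
        rw [hgetD]
        by_cases hf : f = 0
        · subst hf; simp
        · rw [if_neg (fun hh => hf hh.2), if_neg (fun hh => hf hh.symm), zero_mul]
      rw [List.map_congr_left (fun f _ => hpt f),
          sum_if_eq_mem (PySem.List.nodup_pyRange_one 0 n),
          if_pos (PySem.List.mem_pyRange_one.mpr ⟨le_refl 0, by omega⟩)]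
    · have hmne : ¬ (pvShl 1 v = m) := fun hh => hm hh.symm
      rw [if_neg hmne]
      by_cases hb : PySem.Int.band m (pvShl 1 v) ≠ 0
      · rw [if_pos hb]
        apply List.sum_eq_zero
        intro x hx
        rcases List.mem_map.mp hx with ⟨f, _, rfl⟩
        rw [hgetD, if_neg (fun hh => hm hh.1), zero_mul]
      · rw [if_neg hb]
  rw [List.map_congr_left (fun m _ => hterm m),
      sum_if_eq_mem (PySem.List.nodup_pyRange_one 1 (pvShl 1 n)),
      if_pos (PySem.List.mem_pyRange_one.mpr
        ⟨by rw [shl_eq_pow]; exact_mod_cast Nat.one_le_two_pow,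
         by rw [shl_eq_pow, shl_eq_pow]
            exact_mod_cast Nat.pow_lt_pow_right (by norm_num) (by omega)⟩),
      free_single n v hv0 hvn]

-- B's outer loop accumulates the same sums into the histogram
lemma b_hist (Amat : List (List Int)) (n : Int) (hn : 0 < n) :
    ∀ (L : List Int) (hist : List Int), hist.length = n.toNat →
      ((L.foldl (fun hist v => pvExtend Amat n (n.toNat - 1) v (pvShl 1 v) 0 hist) hist).length
        = n.toNat) ∧
      ∀ g : Int, 0 ≤ g → g < n →
        PySem.List.pyGetD
          (L.foldl (fun hist v => pvExtend Amat n (n.toNat - 1) v (pvShl 1 v) 0 hist) hist) g 0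
        = PySem.List.pyGetD hist g 0 +
          (L.map (fun v => pvF Amat n (n.toNat - 1) (pvShl 1 v) v 0 g)).sum := by
  intro L
  induction L with
  | nil => intro hist hlen; exact ⟨hlen, by simp⟩
  | cons v L ihL =>
    intro hist hlen
    simp only [List.foldl_cons, List.map_cons, List.sum_cons]
    obtain ⟨hl1, hg1⟩ := extend_spec Amat n (n.toNat - 1) v (pvShl 1 v) 0 hist
      (le_refl 0) hn hlen
    obtain ⟨hl2, hg2⟩ := ihL _ hl1
    refine ⟨hl2, fun g hg0 hgn => ?_⟩
    rw [hg2 g hg0 hgn, hg1 g hg0 hgn]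
    ring

theorem main_eq (Amat : List (List Int)) (n : Int) (hn0 : 0 ≤ n) :
    forward_edge_dist_dp Amat n = forward_edge_dist_dp_alt Amat n := by
  unfold forward_edge_dist_dp forward_edge_dist_dp_alt
  rw [A_items (pvADict Amat n) (pvShl 1 n - 1) n]
  apply List.map_congr_left
  intro g hgmem
  rcases PySem.List.mem_pyRange_one.mp hgmem with ⟨hg0, hgn⟩
  have hn1 : 0 < n := by omega
  congr 1
  have hAns : ((PySem.List.pyRange 0 n 1).map
      (fun v => (pvADict Amat n).getD (pvShl 1 n - 1, v, g) 0)).sum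
      = pvAns n (pvADict Amat n) g := rfl
  rw [hAns]
  have hd : (1:Int) + (((pvShl 1 n - 1).toNat : Nat) : Int) = pvShl 1 n := by
    have := shl_pos n
    omega
  have hinv := inv_phi Amat n g hg0 hgn (pvShl 1 n - 1).toNat 1
    ((PySem.List.pyRange 0 n 1).foldl
      (fun dp v => dp.insert (pvShl 1 v, v, (0 : Int)) 1) PySem.Dict.empty)
    (le_refl 1) hd
  unfold pvADict
  rw [hinv]
  have hdne : (pvShl 1 n - 1).toNat ≠ 0 := by
    have h2 : (1:Nat) < 2 ^ n.toNat := Nat.one_lt_two_pow_iff.mpr (by omega)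
    have := shl_eq_pow n
    omega
  rw [if_neg hdne, add_zero, phi_init Amat n g hg0 hgn]
  obtain ⟨_, hb⟩ := b_hist Amat n hn1 (PySem.List.pyRange 0 n 1) (pvZero n) (by simp [pvZero])
  rw [hb g hg0 hgn, pyGetD_pvZero n g hg0, zero_add]

-- ===== VERDICT (by name: the statement is the Claim_ definition above) =====
theorem forward_edge_dist_dp_spec : Claim_equal_forward_edge_dist_dp := by
  intro A n _ hpre
  unfold Spec_forward_edge_dist_dp
  exact main_eq A n hpre.1
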